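-- pv_equiv track=rewrite | github.com/Santh0shKr1shna/advent-of-code | 2025/Day08/main.py | part_one
-- ===== SOURCE A (Python) =====
-- from collections import defaultdict
--
-- def part_one(points, connection_limit = 1000):
--     n = len(points)
--     edges = []
--
--     for i in range(n):
--         for j in range(i + 1, n):
--             p1 = points[i]
--             p2 = points[j]
--             dist = (p1[0]-p2[0])**2 + (p1[1]-p2[1])**2 + (p1[2]-p2[2])**2
--             edges.append((dist, i, j))
--
--     edges.sort(key=lambda x: x[0])
--
--     parent = list(range(n))
--
--     def find(i):
--         if parent[i] != i:
--             parent[i] = find(parent[i])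
--         return parent[i]
--
--     for _, i, j in edges[:connection_limit]:
--         if find(i) != find(j):
--             parent[find(i)] = parent[find(j)]
--
--     circuits = defaultdict(int)
--     for i in range(n):
--         circuits[find(i)] += 1
--
--     sizes = list(circuits.values())
--     sizes.sort(reverse=True)
--
--     result = 1
--     for i in sizes[:3]:
--         result *= i
--
--     return result
-- ===== SOURCE B (Python) =====
-- def part_one(points, connection_limit = 1000):
--     n = len(points)
--     edges = sorted(
--         (((points[i][0]-points[j][0])**2 + (points[i][1]-points[j][1])**2 + (points[i][2]-points[j][2])**2, i, j)
--          for i in range(n) for j in range(i + 1, n)),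
--         key=lambda e: e[0])
--
--     comp = list(range(n))
--     for _, i, j in edges[:connection_limit]:
--         ci, cj = comp[i], comp[j]
--         if ci != cj:
--             comp = [ci if c == cj else c for c in comp]
--
--     counts = {}
--     for c in comp:
--         counts[c] = counts.get(c, 0) + 1
--
--     sizes = sorted(counts.values(), reverse=True)
--
--     result = 1
--     for s in sizes[:3]:
--         result *= s
--     return result
-- ===== Notes on version B (the rewrite author's own statement) =====
-- stated objective: alternative
-- what changed: Replaces the recursive path-compressing union-find (parent forest, four find calls per edge) by direct component relabelling: a flat label array where merging an edge rewrites one label to the other, and counts are grouped with a plain dict.get instead of a defaultdict over find(i).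
import Mathlib
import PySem

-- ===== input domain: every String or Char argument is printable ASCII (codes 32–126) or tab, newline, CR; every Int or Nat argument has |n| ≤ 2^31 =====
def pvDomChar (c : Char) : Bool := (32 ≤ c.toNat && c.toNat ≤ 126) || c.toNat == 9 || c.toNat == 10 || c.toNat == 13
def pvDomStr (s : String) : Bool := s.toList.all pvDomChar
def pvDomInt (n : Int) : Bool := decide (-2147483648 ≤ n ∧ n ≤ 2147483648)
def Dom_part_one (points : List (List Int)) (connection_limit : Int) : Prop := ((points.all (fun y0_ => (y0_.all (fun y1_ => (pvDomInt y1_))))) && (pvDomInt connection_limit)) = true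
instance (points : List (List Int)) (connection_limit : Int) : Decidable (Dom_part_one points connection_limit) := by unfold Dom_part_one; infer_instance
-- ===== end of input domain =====

-- B re-implements the union step: direct component relabelling on a label list instead of a
-- recursive path-compressing union-find forest; same edge generation, sort and slice.

-- ===== PORT A =====

-- Python's recursive `find` with path compression; `fuel = len(parent)` bounds the recursion
-- depth, which for a valid parent forest is at most the number of nodes (proved below).
def findUF : Nat → List Int → Int → List Int × Int
  | 0, p, i => (p, i)
  | fuel+1, p, i =>
    if PySem.List.pyGetD p i 0 ≠ i then
      let res := findUF fuel p (PySem.List.pyGetD p i 0)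
      let p2 := PySem.List.pySetD res.1 i res.2
      (p2, PySem.List.pyGetD p2 i 0)
    else (p, PySem.List.pyGetD p i 0)

-- body of A's edge loop: `if find(i) != find(j): parent[find(i)] = parent[find(j)]`
-- (Python evaluates find(i), find(j) in the test, then find(j), find(i) again in the assignment)
def unionStep (p : List Int) (e : Int × Int × Int) : List Int :=
  let f1 := findUF p.length p e.2.1
  let f2 := findUF f1.1.length f1.1 e.2.2
  if f1.2 ≠ f2.2 then
    let f3 := findUF f2.1.length f2.1 e.2.2
    let v := PySem.List.pyGetD f3.1 f3.2 0
    let f4 := findUF f3.1.length f3.1 e.2.1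
    PySem.List.pySetD f4.1 f4.2 v
  else f2.1

-- body of A's counting loop: `circuits[find(i)] += 1` (defaultdict(int))
def circuitStep (st : List Int × PySem.Dict Int Int) (i : Int) : List Int × PySem.Dict Int Int :=
  let f := findUF st.1.length st.1 i
  (f.1, st.2.modify f.2 0 (· + 1))

def part_one (points : List (List Int)) (connection_limit : Int) : Int :=
  let n : Int := PySem.List.len points
  let edges : List (Int × Int × Int) :=
    (PySem.List.pyRange 0 n 1).foldl (fun acc i =>
      (PySem.List.pyRange (i+1) n 1).foldl (fun acc j =>
        acc ++ [((PySem.List.pyGetD (PySem.List.pyGetD points i []) 0 0 - PySem.List.pyGetD (PySem.List.pyGetD points j []) 0 0)^2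
               + (PySem.List.pyGetD (PySem.List.pyGetD points i []) 1 0 - PySem.List.pyGetD (PySem.List.pyGetD points j []) 1 0)^2
               + (PySem.List.pyGetD (PySem.List.pyGetD points i []) 2 0 - PySem.List.pyGetD (PySem.List.pyGetD points j []) 2 0)^2, i, j)]) acc) []
  let edgesS := PySem.List.sorted edges (fun e => e.1) false
  let parent0 := PySem.List.pyRange 0 n 1
  let parent1 := (PySem.List.slice edgesS none (some connection_limit)).foldl unionStep parent0
  let st := (PySem.List.pyRange 0 n 1).foldl circuitStep (parent1, PySem.Dict.empty)
  let sizes := PySem.List.sorted st.2.values (fun x => x) true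
  (PySem.List.slice sizes none (some 3)).foldl (fun r s => r * s) 1

-- ===== PORT B =====

-- body of B's merge loop: if the two labels differ, rewrite every occurrence of one to the other
def relabelStep (comp : List Int) (e : Int × Int × Int) : List Int :=
  let ci := PySem.List.pyGetD comp e.2.1 0
  let cj := PySem.List.pyGetD comp e.2.2 0
  if ci ≠ cj then comp.map (fun c => if c = cj then ci else c) else comp

def part_one_alt (points : List (List Int)) (connection_limit : Int) : Int :=
  let n : Int := PySem.List.len points
  let edges : List (Int × Int × Int) :=
    PySem.List.sorted
      ((PySem.List.pyRange 0 n 1).flatMap (fun i =>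
        (PySem.List.pyRange (i+1) n 1).map (fun j =>
          ((PySem.List.pyGetD (PySem.List.pyGetD points i []) 0 0 - PySem.List.pyGetD (PySem.List.pyGetD points j []) 0 0)^2
         + (PySem.List.pyGetD (PySem.List.pyGetD points i []) 1 0 - PySem.List.pyGetD (PySem.List.pyGetD points j []) 1 0)^2
         + (PySem.List.pyGetD (PySem.List.pyGetD points i []) 2 0 - PySem.List.pyGetD (PySem.List.pyGetD points j []) 2 0)^2, i, j))))
      (fun e => e.1) false
  let comp := (PySem.List.slice edges none (some connection_limit)).foldl relabelStep (PySem.List.pyRange 0 n 1)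
  let counts := comp.foldl (fun d c => d.insert c (d.getD c 0 + 1)) PySem.Dict.empty
  let sizes := PySem.List.sorted counts.values (fun x => x) true
  (PySem.List.slice sizes none (some 3)).foldl (fun r s => r * s) 1

-- ===== PRECONDITION & SPEC =====
-- Pre_ excludes exactly the inputs where Python A raises IndexError: two or more points with
-- some point having fewer than 3 coordinates (with at most one point no coordinate is read).
def Pre_part_one (points : List (List Int)) (connection_limit : Int) : Prop :=
  points.length ≤ 1 ∨ ∀ p ∈ points, 3 ≤ p.length
instance (points : List (List Int)) (connection_limit : Int) : Decidable (Pre_part_one points connection_limit) := by unfold Pre_part_one; infer_instance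
def pvWitness_part_one : List (List Int) × Int := ([[0,0,0],[1,0,0],[0,2,0]], 2)

def Spec_part_one (points : List (List Int)) (connection_limit : Int) (out : Int) : Prop := out = part_one_alt points connection_limit
instance (points : List (List Int)) (connection_limit : Int) (out : Int) : Decidable (Spec_part_one points connection_limit out) := by unfold Spec_part_one; infer_instance

-- ===== CLAIM (what is proved, stated in full; the proofs are below) =====
def Claim_equal_part_one : Prop := ∀ (points : List (List Int)) (connection_limit : Int), Dom_part_one points connection_limit → Pre_part_one points connection_limit → Spec_part_one points connection_limit (part_one points connection_limit)

-- ===== LEMMAS AND PROOFS =====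

lemma pv_inRange {m : ℕ} {i : Int} (h0 : 0 ≤ i) (h1 : i < (m:Int)) : PySem.Raise.InRange m i := by
  constructor <;> omega

lemma pg_mem (p : List Int) {i : Int} (h0 : 0 ≤ i) (h1 : i < (p.length:Int)) :
    PySem.List.pyGetD p i 0 ∈ p :=
  PySem.List.pyGetD_mem p 0 (pv_inRange h0 h1)

lemma pg_out (p : List Int) {y : Int} (h : ¬ y < (p.length:Int)) :
    PySem.List.pyGetD p y 0 = 0 := by
  apply PySem.List.pyGetD_of_none
  rw [PySem.List.pyGet?_eq_none_iff]
  intro hir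
  exact h hir.2

lemma pgset (q : List Int) (x v y : Int) (h0 : 0 ≤ x) (h1 : x < (q.length:Int)) (h2 : 0 ≤ y) :
    PySem.List.pyGetD (PySem.List.pySetD q x v) y 0 = if y = x then v else PySem.List.pyGetD q y 0 := by
  rw [PySem.List.pySetD_of_nonneg q v h0]
  by_cases hxy : y = x
  · subst hxy
    rw [if_pos rfl, PySem.List.pyGetD_eq_getElem _ _ h2 (by rw [List.length_set]; omega)]
    rw [List.getElem_set_self (by rw [List.length_set] at *; omega)]
  · rw [if_neg hxy]
    by_cases hy1 : y < (q.length:Int)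
    · rw [PySem.List.pyGetD_eq_getElem _ _ h2 (by rw [List.length_set]; omega),
          PySem.List.pyGetD_eq_getElem _ _ h2 hy1]
      rw [List.getElem_set, if_neg (by omega)]
    · rw [pg_out _ (by rw [List.length_set]; omega), pg_out _ hy1]

lemma pg_range {n : ℕ} {i : Int} (h0 : 0 ≤ i) (h1 : i < (n:Int)) :
    PySem.List.pyGetD (PySem.List.pyRange 0 (n:Int) 1) i 0 = i := by
  rw [PySem.List.pyGetD_eq_getElem _ _ h0 (by rw [PySem.List.length_pyRange_one]; omega)]
  rw [PySem.List.getElem_pyRange_one 0 (n:Int) i.toNat (by rw [PySem.List.length_pyRange_one]; omega)]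
  omega

-- chain-following in A's parent forest: `Reaches p i r` = repeatedly taking parent from i ends at root r
inductive Reaches (p : List Int) : Int → Int → Prop
  | root (i : Int) : PySem.List.pyGetD p i 0 = i → Reaches p i i
  | step (i r : Int) : PySem.List.pyGetD p i 0 ≠ i → Reaches p (PySem.List.pyGetD p i 0) r → Reaches p i r

-- same, recording the list of non-root nodes visited
inductive ReachesVia (p : List Int) : Int → Int → List Int → Prop
  | root (i : Int) : PySem.List.pyGetD p i 0 = i → ReachesVia p i i []
  | step (i r : Int) (l : List Int) : PySem.List.pyGetD p i 0 ≠ i →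
      ReachesVia p (PySem.List.pyGetD p i 0) r l → ReachesVia p i r (i :: l)

lemma reaches_det {p : List Int} {i r r' : Int} (h : Reaches p i r) : Reaches p i r' → r = r' := by
  induction h with
  | root i hi => intro h'; cases h' with
    | root _ _ => rfl
    | step _ _ hne _ => exact absurd hi hne
  | step i r hne hsub ih => intro h'; cases h' with
    | root _ hi => exact absurd hi hne
    | step _ _ _ hsub' => exact ih hsub'

lemma reaches_last_root {p : List Int} {i r : Int} (h : Reaches p i r) :
    PySem.List.pyGetD p r 0 = r := by
  induction h with
  | root i hi => exact hi
  | step i r hne hsub ih => exact ih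

lemma reaches_range {n : ℕ} {p : List Int} (hlen : p.length = n)
    (hb : ∀ x ∈ p, 0 ≤ x ∧ x < (n:Int)) {i r : Int} (h : Reaches p i r) :
    0 ≤ i → i < (n:Int) → 0 ≤ r ∧ r < (n:Int) := by
  induction h with
  | root i hi => exact fun h0 h1 => ⟨h0, h1⟩
  | step i r hne hsub ih =>
    intro h0 h1
    have hm := hb _ (pg_mem p h0 (by omega))
    exact ih hm.1 hm.2

lemma reachesVia_reaches {p : List Int} {i r : Int} {l : List Int} (h : ReachesVia p i r l) :
    Reaches p i r := by
  induction h with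
  | root i hi => exact Reaches.root i hi
  | step i r l hne hsub ih => exact Reaches.step i r hne ih

lemma reaches_toVia {p : List Int} {i r : Int} (h : Reaches p i r) :
    ∃ l, ReachesVia p i r l := by
  induction h with
  | root i hi => exact ⟨[], ReachesVia.root i hi⟩
  | step i r hne hsub ih => obtain ⟨l, hl⟩ := ih; exact ⟨i :: l, ReachesVia.step i r l hne hl⟩

lemma reachesVia_det {p : List Int} {i r r' : Int} {l l' : List Int}
    (h : ReachesVia p i r l) : ReachesVia p i r' l' → l = l' := by
  induction h generalizing l' with
  | root i hi => intro h'; cases h' with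
    | root _ _ => rfl
    | step _ _ _ hne _ => exact absurd hi hne
  | step i r l hne hsub ih => intro h'; cases h' with
    | root _ hi => exact absurd hi hne
    | step _ _ l₂ _ hsub' => rw [ih hsub']

lemma reachesVia_suffix {p : List Int} {i r : Int} {l : List Int} (h : ReachesVia p i r l) :
    ∀ x l2, (x :: l2) <:+ l → ReachesVia p x r (x :: l2) := by
  induction h with
  | root i hi =>
    intro x l2 hs
    have := List.eq_nil_of_suffix_nil hs
    simp at this
  | step i r l hne hsub ih =>
    intro x l2 hs
    rcases List.suffix_cons_iff.mp hs with heq | hs'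
    · injection heq with h1 h2
      subst h1; subst h2
      exact ReachesVia.step _ _ _ hne hsub
    · exact ih x l2 hs'

lemma reachesVia_nonroot {p : List Int} {i r : Int} {l : List Int} (h : ReachesVia p i r l) :
    ∀ x ∈ l, PySem.List.pyGetD p x 0 ≠ x := by
  induction h with
  | root i hi => intro x hx; simp at hx
  | step i r l hne hsub ih =>
    intro x hx
    rcases List.mem_cons.mp hx with rfl | hx'
    · exact hne
    · exact ih x hx'

lemma reachesVia_nodup {p : List Int} {i r : Int} {l : List Int} (h : ReachesVia p i r l) :
    l.Nodup := by
  induction h with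
  | root i hi => exact List.nodup_nil
  | step i r l hne hsub ih =>
    refine List.nodup_cons.mpr ⟨?_, ih⟩
    intro hmem
    obtain ⟨s, t, hst⟩ := List.append_of_mem hmem
    have hsfx : (i :: t) <:+ (i :: l) := by
      refine List.IsSuffix.trans ?_ (List.suffix_cons i l)
      exact ⟨s, by rw [hst]⟩
    have hfull : ReachesVia p i r (i :: l) := ReachesVia.step i r l hne hsub
    have h2 := reachesVia_suffix hfull i t hsfx
    have := reachesVia_det hfull h2
    have hlen : l.length = t.length := by
      have := congrArg List.length this
      simpa using this
    rw [hst] at hlen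
    simp at hlen
    omega

lemma reachesVia_mem_range {n : ℕ} {p : List Int} (hlen : p.length = n)
    (hb : ∀ x ∈ p, 0 ≤ x ∧ x < (n:Int)) {i r : Int} {l : List Int} (h : ReachesVia p i r l) :
    0 ≤ i → i < (n:Int) → ∀ x ∈ l, 0 ≤ x ∧ x < (n:Int) := by
  induction h with
  | root i hi => intro _ _ x hx; simp at hx
  | step i r l hne hsub ih =>
    intro h0 h1 x hx
    have hm := hb _ (pg_mem p h0 (by omega))
    rcases List.mem_cons.mp hx with rfl | hx'
    · exact ⟨h0, h1⟩
    · exact ih hm.1 hm.2 x hx'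

lemma nodup_bounded_length {n : ℕ} (l : List Int) (hnd : l.Nodup)
    (hb : ∀ x ∈ l, 0 ≤ x ∧ x < (n:Int)) : l.length ≤ n := by
  classical
  have h1 : (l.map Int.toNat).Nodup := by
    refine List.Nodup.map_on ?_ hnd
    intro a ha b hb' hab
    have := hb a ha; have := hb b hb'; omega
  have h3 : (l.map Int.toNat).toFinset ⊆ Finset.range n := by
    intro y hy
    rw [List.mem_toFinset, List.mem_map] at hy
    obtain ⟨a, ha, rfl⟩ := hy
    have := hb a ha
    rw [Finset.mem_range]
    omega
  calc l.length = (l.map Int.toNat).length := (List.length_map ..).symm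
    _ = (l.map Int.toNat).toFinset.card := (List.toFinset_card_of_nodup h1).symm
    _ ≤ (Finset.range n).card := Finset.card_le_card h3
    _ = n := Finset.card_range n

-- valid parent state: right length, entries in range, every node reaches a root
def Good (n : ℕ) (p : List Int) : Prop :=
  p.length = n ∧ (∀ x ∈ p, 0 ≤ x ∧ x < (n:Int)) ∧
  (∀ i : Int, 0 ≤ i → i < (n:Int) → ∃ r, Reaches p i r)

lemma set_preserves {n : ℕ} {q : List Int} {x r : Int} (hg : Good n q)
    (hx0 : 0 ≤ x) (hx1 : x < (n:Int)) (hr : Reaches q x r) :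
    (∀ y z, 0 ≤ y → y < (n:Int) → Reaches q y z → Reaches (PySem.List.pySetD q x r) y z) ∧
    Good n (PySem.List.pySetD q x r) := by
  obtain ⟨hlen, hb, htot⟩ := hg
  have hrl := reaches_last_root hr
  have hrb := reaches_range hlen hb hr hx0 hx1
  have hset : ∀ y, 0 ≤ y →
      PySem.List.pyGetD (PySem.List.pySetD q x r) y 0 = if y = x then r else PySem.List.pyGetD q y 0 :=
    fun y hy => pgset q x r y hx0 (by omega) hy
  have hpres : ∀ y z, 0 ≤ y → y < (n:Int) → Reaches q y z → Reaches (PySem.List.pySetD q x r) y z := by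
    intro y z hy0 hy1 h
    induction h with
    | root y hyroot =>
      by_cases hxy : y = x
      · subst hxy
        have : r = y := reaches_det hr (Reaches.root y hyroot)
        subst this
        exact Reaches.root r (by rw [hset r hy0, if_pos rfl])
      · exact Reaches.root y (by rw [hset y hy0, if_neg hxy]; exact hyroot)
    | step y z hne hsub ih =>
      have hmb := hb _ (pg_mem q hy0 (by omega))
      by_cases hxy : y = x
      · subst hxy
        have hz : z = r := reaches_det (Reaches.step y z hne hsub) hr
        subst hz
        by_cases hrx : z = y
        · subst hrx
          exact absurd hrl hne
        · refine Reaches.step y z ?_ ?_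
          · rw [hset y hy0, if_pos rfl]; exact fun h => hrx h
          · rw [hset y hy0, if_pos rfl]
            exact Reaches.root z (by rw [hset z hrb.1, if_neg hrx]; exact hrl)
      · refine Reaches.step y z ?_ ?_
        · rw [hset y hy0, if_neg hxy]; exact hne
        · rw [hset y hy0, if_neg hxy]; exact ih hmb.1 hmb.2
  refine ⟨hpres, ?_, ?_, ?_⟩
  · rw [PySem.List.length_pySetD]; exact hlen
  · intro v hv
    rw [PySem.List.pySetD_of_nonneg q r hx0] at hv
    rcases List.mem_or_eq_of_mem_set hv with hv' | rfl
    · exact hb v hv'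
    · exact hrb
  · intro i h0 h1
    obtain ⟨z, hz⟩ := htot i h0 h1
    exact ⟨z, hpres i z h0 h1 hz⟩

lemma findUF_succ (fuel : ℕ) (p : List Int) (i : Int) :
    findUF (fuel+1) p i =
    if PySem.List.pyGetD p i 0 ≠ i then
      (PySem.List.pySetD (findUF fuel p (PySem.List.pyGetD p i 0)).1 i (findUF fuel p (PySem.List.pyGetD p i 0)).2,
       PySem.List.pyGetD (PySem.List.pySetD (findUF fuel p (PySem.List.pyGetD p i 0)).1 i (findUF fuel p (PySem.List.pyGetD p i 0)).2) i 0)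
    else (p, PySem.List.pyGetD p i 0) := rfl

lemma findUF_go {n : ℕ} {p : List Int} (hg : Good n p) {i r : Int} {l : List Int}
    (hvia : ReachesVia p i r l) :
    0 ≤ i → i < (n:Int) → ∀ fuel, l.length < fuel →
    (findUF fuel p i).2 = r ∧ Good n (findUF fuel p i).1 ∧
    (∀ y z, 0 ≤ y → y < (n:Int) → Reaches p y z → Reaches (findUF fuel p i).1 y z) := by
  induction hvia with
  | root i hi =>
    intro h0 h1 fuel hfuel
    cases fuel with
    | zero => omega
    | succ f =>
      rw [findUF_succ, if_neg (not_not_intro hi)]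
      exact ⟨hi, hg, fun y z _ _ h => h⟩
  | step i r l hne hsub ih =>
    intro h0 h1 fuel hfuel
    cases fuel with
    | zero => simp at hfuel
    | succ f =>
      obtain ⟨hlen, hb, htot⟩ := hg
      have hmb := hb _ (pg_mem p h0 (by omega))
      obtain ⟨hres2, hresg, hrespres⟩ := ih hmb.1 hmb.2 f (by simp at hfuel; omega)
      rw [findUF_succ, if_pos hne]
      have hri : Reaches (findUF f p (PySem.List.pyGetD p i 0)).1 i r :=
        hrespres i r h0 h1 (reachesVia_reaches (ReachesVia.step i r l hne hsub))
      rw [hres2]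
      obtain ⟨hpres2, hg2⟩ := set_preserves hresg h0 h1 hri
      refine ⟨?_, hg2, ?_⟩
      · rw [pgset _ _ _ _ h0 (by rw [hresg.1]; omega) h0, if_pos rfl]
      · intro y z hy0 hy1 h
        exact hpres2 y z hy0 hy1 (hrespres y z hy0 hy1 h)

lemma findUF_total {n : ℕ} {p : List Int} (hg : Good n p) {i : Int} (h0 : 0 ≤ i) (h1 : i < (n:Int)) :
    Reaches p i (findUF p.length p i).2 ∧ Good n (findUF p.length p i).1 ∧
    (∀ y z, 0 ≤ y → y < (n:Int) → Reaches p y z → Reaches (findUF p.length p i).1 y z) := by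
  obtain ⟨r, hr⟩ := hg.2.2 i h0 h1
  obtain ⟨l, hvia⟩ := reaches_toVia hr
  have hnd : (r :: l).Nodup := by
    refine List.nodup_cons.mpr ⟨?_, reachesVia_nodup hvia⟩
    intro hmem
    exact reachesVia_nonroot hvia r hmem (reaches_last_root hr)
  have hbd : ∀ x ∈ (r :: l), 0 ≤ x ∧ x < (n:Int) := by
    intro x hx
    rcases List.mem_cons.mp hx with rfl | hx'
    · exact reaches_range hg.1 hg.2.1 hr h0 h1
    · exact reachesVia_mem_range hg.1 hg.2.1 hvia h0 h1 x hx'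
  have hlen : l.length < p.length := by
    have := nodup_bounded_length (n := n) (r :: l) hnd hbd
    simp at this
    have hpn : p.length = n := hg.1
    omega
  obtain ⟨h2, hgood, hpres⟩ := findUF_go hg hvia h0 h1 p.length hlen
  exact ⟨h2 ▸ hr, hgood, hpres⟩

-- the A/B coupling invariant: p is a valid forest and comp labels exactly its components
def LinkInv (n : ℕ) (p comp : List Int) : Prop :=
  Good n p ∧ comp.length = n ∧
  (∀ x z, 0 ≤ x → x < (n:Int) → Reaches p x z →
    PySem.List.pyGetD comp z 0 = PySem.List.pyGetD comp x 0) ∧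
  (∀ x y, 0 ≤ x → x < (n:Int) → 0 ≤ y → y < (n:Int) →
    PySem.List.pyGetD p x 0 = x → PySem.List.pyGetD p y 0 = y →
    PySem.List.pyGetD comp x 0 = PySem.List.pyGetD comp y 0 → x = y)

lemma pg_map (comp : List Int) (f : Int → Int) {y : Int} (h0 : 0 ≤ y) (h1 : y < (comp.length:Int)) :
    PySem.List.pyGetD (comp.map f) y 0 = f (PySem.List.pyGetD comp y 0) := by
  rw [PySem.List.pyGetD_eq_getElem _ _ h0 (by rw [List.length_map]; omega),
      PySem.List.pyGetD_eq_getElem _ _ h0 h1, List.getElem_map]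

lemma reaches_pin {n : ℕ} {p q : List Int} (hgp : Good n p)
    (hpres : ∀ y z, 0 ≤ y → y < (n:Int) → Reaches p y z → Reaches q y z)
    {x r : Int} (hx0 : 0 ≤ x) (hx1 : x < (n:Int)) (hq : Reaches q x r) : Reaches p x r := by
  obtain ⟨u, hu⟩ := hgp.2.2 x hx0 hx1
  have h2 := hpres x u hx0 hx1 hu
  have h3 := reaches_det hq h2
  rw [h3]
  exact hu

lemma linkInv_transfer {n : ℕ} {p q comp : List Int} (hL : LinkInv n p comp) (hq : Good n q)
    (hpres : ∀ y z, 0 ≤ y → y < (n:Int) → Reaches p y z → Reaches q y z) : LinkInv n q comp := by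
  obtain ⟨hgp, hcl, hc1, hc2⟩ := hL
  refine ⟨hq, hcl, ?_, ?_⟩
  · intro x z hx0 hx1 hz
    exact hc1 x z hx0 hx1 (reaches_pin hgp hpres hx0 hx1 hz)
  · intro x y hx0 hx1 hy0 hy1 hrx hry hc
    have hpx : PySem.List.pyGetD p x 0 = x :=
      reaches_last_root (reaches_pin hgp hpres hx0 hx1 (Reaches.root x hrx))
    have hpy : PySem.List.pyGetD p y 0 = y :=
      reaches_last_root (reaches_pin hgp hpres hy0 hy1 (Reaches.root y hry))
    exact hc2 x y hx0 hx1 hy0 hy1 hpx hpy hc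

lemma link_roots {n : ℕ} {q : List Int} (hg : Good n q) {ri rj : Int}
    (h1 : 0 ≤ ri) (h2 : ri < (n:Int)) (h3 : 0 ≤ rj) (h4 : rj < (n:Int))
    (hri : PySem.List.pyGetD q ri 0 = ri) (hrj : PySem.List.pyGetD q rj 0 = rj) (hne : ri ≠ rj) :
    (∀ x z, 0 ≤ x → x < (n:Int) → Reaches q x z →
      Reaches (PySem.List.pySetD q ri rj) x (if z = ri then rj else z)) ∧
    Good n (PySem.List.pySetD q ri rj) := by
  obtain ⟨hlen, hb, htot⟩ := hg
  have hset : ∀ y, 0 ≤ y →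
      PySem.List.pyGetD (PySem.List.pySetD q ri rj) y 0 = if y = ri then rj else PySem.List.pyGetD q y 0 :=
    fun y hy => pgset q ri rj y h1 (by omega) hy
  have hfwd : ∀ x z, 0 ≤ x → x < (n:Int) → Reaches q x z →
      Reaches (PySem.List.pySetD q ri rj) x (if z = ri then rj else z) := by
    intro x z hx0 hx1 h
    induction h with
    | root x hx =>
      by_cases hxr : x = ri
      · subst hxr
        rw [if_pos rfl]
        refine Reaches.step x rj ?_ ?_
        · rw [hset x hx0, if_pos rfl]; exact fun h => hne h.symm
        · rw [hset x hx0, if_pos rfl]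
          exact Reaches.root rj (by rw [hset rj h3, if_neg (fun h => hne h.symm)]; exact hrj)
      · rw [if_neg hxr]
        exact Reaches.root x (by rw [hset x hx0, if_neg hxr]; exact hx)
    | step x z hxne hsub ih =>
      have hxr : x ≠ ri := by intro h; rw [h] at hxne; exact hxne hri
      have hmb := hb _ (pg_mem q hx0 (by omega))
      refine Reaches.step x _ ?_ ?_
      · rw [hset x hx0, if_neg hxr]; exact hxne
      · rw [hset x hx0, if_neg hxr]; exact ih hmb.1 hmb.2
  refine ⟨hfwd, ?_, ?_, ?_⟩
  · rw [PySem.List.length_pySetD]; exact hlen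
  · intro v hv
    rw [PySem.List.pySetD_of_nonneg q rj h1] at hv
    rcases List.mem_or_eq_of_mem_set hv with hv' | rfl
    · exact hb v hv'
    · exact ⟨h3, h4⟩
  · intro x hx0 hx1
    obtain ⟨z, hz⟩ := htot x hx0 hx1
    exact ⟨_, hfwd x z hx0 hx1 hz⟩

lemma link_union {n : ℕ} {p comp : List Int} (hL : LinkInv n p comp) (e : Int × Int × Int)
    (hi0 : 0 ≤ e.2.1) (hi1 : e.2.1 < (n:Int)) (hj0 : 0 ≤ e.2.2) (hj1 : e.2.2 < (n:Int)) :
    LinkInv n (unionStep p e) (relabelStep comp e) := by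
  obtain ⟨hgp, hcl, hc1, hc2⟩ := hL
  simp only [unionStep, relabelStep]
  set f1 := findUF p.length p e.2.1 with hf1
  set f2 := findUF f1.1.length f1.1 e.2.2 with hf2
  set ci := PySem.List.pyGetD comp e.2.1 0 with hci
  set cj := PySem.List.pyGetD comp e.2.2 0 with hcj
  obtain ⟨hr1, hg1, hp1⟩ := findUF_total hgp hi0 hi1
  obtain ⟨hr2, hg2, hp2⟩ := findUF_total hg1 hj0 hj1
  rw [← hf1] at hr1 hg1 hp1
  rw [← hf2] at hr2 hg2 hp2
  have hrj_p : Reaches p e.2.2 f2.2 := reaches_pin hgp hp1 hj0 hj1 hr2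
  have hri_p : Reaches p e.2.1 f1.2 := hr1
  have hribnd := reaches_range hgp.1 hgp.2.1 hri_p hi0 hi1
  have hrjbnd := reaches_range hgp.1 hgp.2.1 hrj_p hj0 hj1
  have hcompi : PySem.List.pyGetD comp f1.2 0 = ci := hc1 _ _ hi0 hi1 hri_p
  have hcompj : PySem.List.pyGetD comp f2.2 0 = cj := hc1 _ _ hj0 hj1 hrj_p
  have hrooti : PySem.List.pyGetD p f1.2 0 = f1.2 := reaches_last_root hri_p
  have hrootj : PySem.List.pyGetD p f2.2 0 = f2.2 := reaches_last_root hrj_p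
  have hiff : f1.2 = f2.2 ↔ ci = cj := by
    constructor
    · intro h; rw [← hcompi, ← hcompj, h]
    · intro h
      exact hc2 f1.2 f2.2 hribnd.1 hribnd.2 hrjbnd.1 hrjbnd.2 hrooti hrootj
        (by rw [hcompi, hcompj, h])
  rcases eq_or_ne f1.2 f2.2 with heq | hne
  · rw [if_neg (not_not_intro heq), if_neg (not_not_intro (hiff.mp heq))]
    exact linkInv_transfer ⟨hgp, hcl, hc1, hc2⟩ hg2
      (fun y z hy0 hy1 h => hp2 y z hy0 hy1 (hp1 y z hy0 hy1 h))
  · have hcne : ci ≠ cj := fun h => hne (hiff.mpr h)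
    rw [if_pos hne, if_pos hcne]
    set f3 := findUF f2.1.length f2.1 e.2.2 with hf3
    obtain ⟨hr3, hg3, hp3⟩ := findUF_total hg2 hj0 hj1
    rw [← hf3] at hr3 hg3 hp3
    have hrj2 : Reaches f2.1 e.2.2 f2.2 := hp2 _ _ hj0 hj1 hr2
    have hf32 : f3.2 = f2.2 := reaches_det hr3 hrj2
    have hrj3 : Reaches f3.1 e.2.2 f2.2 := hp3 _ _ hj0 hj1 hrj2
    have hv : PySem.List.pyGetD f3.1 f3.2 0 = f2.2 := by
      rw [hf32]; exact reaches_last_root hrj3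
    set f4 := findUF f3.1.length f3.1 e.2.1 with hf4
    obtain ⟨hr4, hg4, hp4⟩ := findUF_total hg3 hi0 hi1
    rw [← hf4] at hr4 hg4 hp4
    have hri3 : Reaches f3.1 e.2.1 f1.2 := hp3 _ _ hi0 hi1 (hp2 _ _ hi0 hi1 (hp1 _ _ hi0 hi1 hri_p))
    have hf42 : f4.2 = f1.2 := reaches_det hr4 hri3
    have hri4 : Reaches f4.1 e.2.1 f1.2 := hp4 _ _ hi0 hi1 hri3
    have hrj4 : Reaches f4.1 e.2.2 f2.2 := hp4 _ _ hj0 hj1 (hp3 _ _ hj0 hj1 hrj2)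
    have hroot4i : PySem.List.pyGetD f4.1 f1.2 0 = f1.2 := reaches_last_root hri4
    have hroot4j : PySem.List.pyGetD f4.1 f2.2 0 = f2.2 := reaches_last_root hrj4
    rw [hv, hf42]
    -- preservation p → f4.1
    have hpresPQ : ∀ y z, 0 ≤ y → y < (n:Int) → Reaches p y z → Reaches f4.1 y z :=
      fun y z hy0 hy1 h => hp4 y z hy0 hy1 (hp3 y z hy0 hy1 (hp2 y z hy0 hy1 (hp1 y z hy0 hy1 h)))
    obtain ⟨hfwd, hgood⟩ := link_roots hg4 hribnd.1 hribnd.2 hrjbnd.1 hrjbnd.2 hroot4i hroot4j hne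
    have hclen : ((comp.map (fun c => if c = cj then ci else c)).length : ℕ) = n := by
      rw [List.length_map]; exact hcl
    have hgmap : ∀ x, 0 ≤ x → x < (n:Int) →
        PySem.List.pyGetD (comp.map (fun c => if c = cj then ci else c)) x 0 =
        (if PySem.List.pyGetD comp x 0 = cj then ci else PySem.List.pyGetD comp x 0) :=
      fun x h0 h1 => pg_map comp _ h0 (by rw [hcl]; omega)
    refine ⟨hgood, hclen, ?_, ?_⟩
    · -- labels constant along chains of the new parent
      intro x z hx0 hx1 hz
      obtain ⟨w, hw⟩ := hgp.2.2 x hx0 hx1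
      have hwq : Reaches f4.1 x w := hpresPQ x w hx0 hx1 hw
      have hz' := reaches_det hz (hfwd x w hx0 hx1 hwq)
      have hwbnd := reaches_range hgp.1 hgp.2.1 hw hx0 hx1
      have hcw : PySem.List.pyGetD comp w 0 = PySem.List.pyGetD comp x 0 := hc1 x w hx0 hx1 hw
      by_cases hwri : w = f1.2
      · rw [hwri] at hz'; rw [if_pos rfl] at hz'
        rw [hz', hgmap _ hrjbnd.1 hrjbnd.2, hgmap _ hx0 hx1]
        rw [hcompj, if_pos rfl]
        rw [← hcw, hwri, hcompi, if_neg hcne]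
      · rw [if_neg hwri] at hz'
        rw [hz', hgmap _ hwbnd.1 hwbnd.2, hgmap _ hx0 hx1, hcw]
    · -- distinct roots of the new parent carry distinct labels
      intro x y hx0 hx1 hy0 hy1 hrx hry hceq
      have hsetx : PySem.List.pyGetD (PySem.List.pySetD f4.1 f1.2 f2.2) x 0 =
          if x = f1.2 then f2.2 else PySem.List.pyGetD f4.1 x 0 :=
        pgset f4.1 f1.2 f2.2 x hribnd.1 (by rw [hg4.1]; omega) hx0
      have hsety : PySem.List.pyGetD (PySem.List.pySetD f4.1 f1.2 f2.2) y 0 =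
          if y = f1.2 then f2.2 else PySem.List.pyGetD f4.1 y 0 :=
        pgset f4.1 f1.2 f2.2 y hribnd.1 (by rw [hg4.1]; omega) hy0
      have hxne1 : x ≠ f1.2 := by
        intro h; rw [hsetx, if_pos h] at hrx; exact hne (hrx.trans h).symm
      have hyne1 : y ≠ f1.2 := by
        intro h; rw [hsety, if_pos h] at hry; exact hne (hry.trans h).symm
      rw [hsetx, if_neg hxne1] at hrx
      rw [hsety, if_neg hyne1] at hry
      have hpx : PySem.List.pyGetD p x 0 = x :=
        reaches_last_root (reaches_pin hgp hpresPQ hx0 hx1 (Reaches.root x hrx))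
      have hpy : PySem.List.pyGetD p y 0 = y :=
        reaches_last_root (reaches_pin hgp hpresPQ hy0 hy1 (Reaches.root y hry))
      rw [hgmap _ hx0 hx1, hgmap _ hy0 hy1] at hceq
      by_cases hxc : PySem.List.pyGetD comp x 0 = cj <;>
        by_cases hyc : PySem.List.pyGetD comp y 0 = cj
      · rw [if_pos hxc, if_pos hyc] at hceq
        exact hc2 x y hx0 hx1 hy0 hy1 hpx hpy (by rw [hxc, hyc])
      · rw [if_pos hxc, if_neg hyc] at hceq
        have : y = f1.2 :=
          hc2 y f1.2 hy0 hy1 hribnd.1 hribnd.2 hpy hrooti (by rw [← hceq, hcompi])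
        exact absurd this hyne1
      · rw [if_neg hxc, if_pos hyc] at hceq
        have : x = f1.2 :=
          hc2 x f1.2 hx0 hx1 hribnd.1 hribnd.2 hpx hrooti (by rw [hceq, hcompi])
        exact absurd this hxne1
      · rw [if_neg hxc, if_neg hyc] at hceq
        exact hc2 x y hx0 hx1 hy0 hy1 hpx hpy hceq

lemma link_loop {n : ℕ} : ∀ (es : List (Int × Int × Int)) (p comp : List Int),
    LinkInv n p comp →
    (∀ e ∈ es, 0 ≤ e.2.1 ∧ e.2.1 < (n:Int) ∧ 0 ≤ e.2.2 ∧ e.2.2 < (n:Int)) →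
    LinkInv n (es.foldl unionStep p) (es.foldl relabelStep comp)
  | [], p, comp, hL, _ => hL
  | e :: es, p, comp, hL, hb => by
    have he := hb e (List.mem_cons_self ..)
    exact link_loop es _ _ (link_union hL e he.1 he.2.1 he.2.2.1 he.2.2.2)
      (fun e' he' => hb e' (List.mem_cons_of_mem _ he'))

lemma link_init (n : ℕ) : LinkInv n (PySem.List.pyRange 0 (n:Int) 1) (PySem.List.pyRange 0 (n:Int) 1) := by
  have hlen : (PySem.List.pyRange 0 (n:Int) 1).length = n := by
    rw [PySem.List.length_pyRange_one]; omega
  have hself : ∀ x : Int, 0 ≤ x → x < (n:Int) →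
      PySem.List.pyGetD (PySem.List.pyRange 0 (n:Int) 1) x 0 = x := fun x h0 h1 => pg_range h0 h1
  have honly : ∀ x z : Int, 0 ≤ x → x < (n:Int) →
      Reaches (PySem.List.pyRange 0 (n:Int) 1) x z → z = x := by
    intro x z h0 h1 h
    cases h with
    | root _ _ => rfl
    | step _ _ hne _ => exact absurd (hself x h0 h1) hne
  refine ⟨⟨hlen, ?_, ?_⟩, hlen, ?_, ?_⟩
  · intro x hx
    rw [PySem.List.mem_pyRange_one] at hx
    exact hx
  · intro i h0 h1
    exact ⟨i, Reaches.root i (hself i h0 h1)⟩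
  · intro x z h0 h1 h
    rw [honly x z h0 h1 h]
  · intro x y hx0 hx1 hy0 hy1 _ _ hc
    rw [hself x hx0 hx1, hself y hy0 hy1] at hc
    exact hc

lemma circuits_loop {n : ℕ} {pF : List Int} (hgF : Good n pF) :
    ∀ (l : List Int) (p : List Int) (d : PySem.Dict Int Int),
    Good n p → (∀ y z, 0 ≤ y → y < (n:Int) → Reaches pF y z → Reaches p y z) →
    (∀ x ∈ l, 0 ≤ x ∧ x < (n:Int)) →
    (l.foldl circuitStep (p, d)).2 =
      l.foldl (fun d i => d.modify ((findUF pF.length pF i).2) 0 (· + 1)) d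
  | [], p, d, _, _, _ => rfl
  | i :: l, p, d, hg, hpres, hb => by
    have hib := hb i (List.mem_cons_self ..)
    obtain ⟨hrF, _, _⟩ := findUF_total hgF hib.1 hib.2
    obtain ⟨hr, hg', hp'⟩ := findUF_total hg hib.1 hib.2
    have hkey : (findUF p.length p i).2 = (findUF pF.length pF i).2 :=
      reaches_det hr (hpres i _ hib.1 hib.2 hrF)
    show ((l.foldl circuitStep
        ((findUF p.length p i).1, d.modify (findUF p.length p i).2 0 (· + 1))).2) = _
    rw [hkey]
    exact circuits_loop hgF l _ _ hg'
      (fun y z hy0 hy1 h => hp' y z hy0 hy1 (hpres y z hy0 hy1 h))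
      (fun x hx => hb x (List.mem_cons_of_mem _ hx))

lemma link_pattern {n : ℕ} {pF comp : List Int} (hL : LinkInv n pF comp)
    {a b : Int} (ha0 : 0 ≤ a) (ha1 : a < (n:Int)) (hb0 : 0 ≤ b) (hb1 : b < (n:Int)) :
    ((findUF pF.length pF a).2 = (findUF pF.length pF b).2 ↔
      PySem.List.pyGetD comp a 0 = PySem.List.pyGetD comp b 0) := by
  obtain ⟨hg, hcl, hc1, hc2⟩ := hL
  obtain ⟨hra, _, _⟩ := findUF_total hg ha0 ha1
  obtain ⟨hrb, _, _⟩ := findUF_total hg hb0 hb1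
  have hca := hc1 a _ ha0 ha1 hra
  have hcb := hc1 b _ hb0 hb1 hrb
  constructor
  · intro h
    rw [← hca, ← hcb, h]
  · intro h
    have hrabnd := reaches_range hg.1 hg.2.1 hra ha0 ha1
    have hrbbnd := reaches_range hg.1 hg.2.1 hrb hb0 hb1
    exact hc2 _ _ hrabnd.1 hrabnd.2 hrbbnd.1 hrbbnd.2
      (reaches_last_root hra) (reaches_last_root hrb) (by rw [hca, hcb, h])

-- set(map f (range n)) lists f at the first-occurrence indices
lemma ofList_map_range (n : ℕ) (f : ℕ → Int) :
    PySem.Set.ofList ((List.range n).map f) =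
      ((List.range n).filter (fun a => decide (∀ b < a, f b ≠ f a))).map f := by
  induction n with
  | zero => rfl
  | succ m ih =>
    rw [List.range_succ, List.map_append, List.filter_append, List.map_append]
    simp only [List.map_cons, List.map_nil]
    rw [PySem.Set.ofList_append_singleton, PySem.Set.add_eq_ite, ih]
    by_cases h : ∃ b, b < m ∧ f b = f m
    · have hmem : f m ∈ ((List.range m).filter (fun a => decide (∀ b < a, f b ≠ f a))).map f := by
        rw [← ih, PySem.Set.mem_ofList, List.mem_map]
        obtain ⟨b, hb, hfb⟩ := h
        exact ⟨b, by rw [List.mem_range]; omega, hfb⟩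
      rw [if_pos hmem]
      have : (List.filter (fun a => decide (∀ b < a, f b ≠ f a)) [m]) = [] := by
        rw [List.filter_cons, if_neg, List.filter_nil]
        rw [decide_eq_true_eq]
        intro hall
        obtain ⟨b, hb, hfb⟩ := h
        exact hall b hb hfb
      rw [this]
      simp
    · have hmem : f m ∉ ((List.range m).filter (fun a => decide (∀ b < a, f b ≠ f a))).map f := by
        rw [← ih, PySem.Set.mem_ofList, List.mem_map]
        intro ⟨b, hb, hfb⟩
        rw [List.mem_range] at hb
        exact h ⟨b, hb, hfb⟩
      rw [if_neg hmem]
      have : (List.filter (fun a => decide (∀ b < a, f b ≠ f a)) [m]) = [m] := by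
        rw [List.filter_cons, if_pos, List.filter_nil]
        rw [decide_eq_true_eq]
        intro b hb hfb
        exact h ⟨b, hb, hfb⟩
      rw [this]
      simp

lemma values_counter (xs : List Int) :
    (PySem.Dict.counter xs).values = (PySem.Set.ofList xs).map (fun k => ((xs.count k : ℕ) : Int)) := by
  show (PySem.Dict.counter xs).items.map (·.2) = _
  rw [PySem.Dict.items_counter, List.map_map]
  rfl

lemma counter_values_eq (n : ℕ) (f g : ℕ → Int)
    (h : ∀ a b, a < n → b < n → (f a = f b ↔ g a = g b)) :
    (PySem.Set.ofList ((List.range n).map f)).map (fun k => ((((List.range n).map f).count k : ℕ) : Int)) =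
    (PySem.Set.ofList ((List.range n).map g)).map (fun k => ((((List.range n).map g).count k : ℕ) : Int)) := by
  rw [ofList_map_range, ofList_map_range, List.map_map, List.map_map]
  have hfilter : (List.range n).filter (fun a => decide (∀ b < a, f b ≠ f a)) =
      (List.range n).filter (fun a => decide (∀ b < a, g b ≠ g a)) := by
    apply List.filter_congr
    intro a ha
    rw [List.mem_range] at ha
    simp only [decide_eq_decide]
    constructor
    · intro hall b hb hgb
      exact hall b hb ((h b a (by omega) ha).mpr hgb)
    · intro hall b hb hfb
      exact hall b hb ((h b a (by omega) ha).mp hfb)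
  rw [hfilter]
  apply List.map_congr_left
  intro a ha
  rw [List.mem_filter, List.mem_range] at ha
  have ha' : a < n := ha.1
  simp only [Function.comp]
  congr 1
  rw [List.count_eq_countP, List.count_eq_countP, List.countP_map, List.countP_map]
  apply List.countP_congr
  intro b hb
  rw [List.mem_range] at hb
  simp only [Function.comp, beq_iff_eq]
  exact h b a hb ha'

lemma list_eq_map_range_getD (comp : List Int) :
    comp = (List.range comp.length).map (fun (k : ℕ) => PySem.List.pyGetD comp ((k : Int)) 0) := by
  apply List.ext_getElem
  · simp
  · intro k h1 h2
    rw [List.getElem_map, List.getElem_range]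
    rw [PySem.List.pyGetD_eq_getElem _ _ (by omega) (by omega)]
    simp

lemma pyRange_map_eq (n : ℕ) (f : Int → Int) :
    (PySem.List.pyRange 0 (n:Int) 1).map f = (List.range n).map (fun (k : ℕ) => f ((k : Int))) := by
  rw [PySem.List.pyRange_one, List.map_map]
  have : ((n:Int) - 0).toNat = n := by omega
  rw [this]
  apply List.map_congr_left
  intro a _
  simp

lemma sel_bounds {n : ℕ} (F : Int → Int → Int) (cl : Int) :
    ∀ e ∈ PySem.List.slice (PySem.List.sorted
        ((PySem.List.pyRange 0 (n:Int) 1).flatMap (fun i =>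
          (PySem.List.pyRange (i+1) (n:Int) 1).map (fun j => (F i j, i, j))))
        (fun e => e.1) false) none (some cl),
      0 ≤ e.2.1 ∧ e.2.1 < (n:Int) ∧ 0 ≤ e.2.2 ∧ e.2.2 < (n:Int) := by
  intro e he
  have h1 := PySem.List.mem_of_mem_slice _ _ _ he
  rw [PySem.List.mem_sorted] at h1
  rw [List.mem_flatMap] at h1
  obtain ⟨i, hi, hmem⟩ := h1
  rw [List.mem_map] at hmem
  obtain ⟨j, hj, rfl⟩ := hmem
  rw [PySem.List.mem_pyRange_one] at hi hj
  exact ⟨hi.1, hi.2, by show (0:Int) ≤ j; omega, hj.2⟩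

lemma tail_eq {n : ℕ} {SEL : List (Int × Int × Int)}
    (hbsel : ∀ e ∈ SEL, 0 ≤ e.2.1 ∧ e.2.1 < (n:Int) ∧ 0 ≤ e.2.2 ∧ e.2.2 < (n:Int)) :
    (PySem.List.slice (PySem.List.sorted
        ((PySem.List.pyRange 0 (n:Int) 1).foldl circuitStep
          (SEL.foldl unionStep (PySem.List.pyRange 0 (n:Int) 1), PySem.Dict.empty)).2.values
        (fun x => x) true) none (some 3)).foldl (fun r s => r * s) 1 =
    (PySem.List.slice (PySem.List.sorted
        ((SEL.foldl relabelStep (PySem.List.pyRange 0 (n:Int) 1)).foldl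
          (fun d c => d.insert c (d.getD c 0 + 1)) PySem.Dict.empty).values
        (fun x => x) true) none (some 3)).foldl (fun r s => r * s) 1 := by
  have hL := link_loop SEL _ _ (link_init n)
    (fun e he => ⟨(hbsel e he).1, (hbsel e he).2.1, (hbsel e he).2.2.1, (hbsel e he).2.2.2⟩)
  obtain ⟨hgF, hclF, hc1, hc2⟩ := hL
  suffices h : ((PySem.List.pyRange 0 (n:Int) 1).foldl circuitStep
        (SEL.foldl unionStep (PySem.List.pyRange 0 (n:Int) 1), PySem.Dict.empty)).2.values =
      ((SEL.foldl relabelStep (PySem.List.pyRange 0 (n:Int) 1)).foldl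
        (fun d c => d.insert c (d.getD c 0 + 1)) PySem.Dict.empty).values by
    rw [h]
  have hcirc := circuits_loop hgF (PySem.List.pyRange 0 (n:Int) 1)
    (SEL.foldl unionStep (PySem.List.pyRange 0 (n:Int) 1)) PySem.Dict.empty hgF
    (fun y z _ _ hr => hr)
    (fun x hx => by rw [PySem.List.mem_pyRange_one] at hx; exact hx)
  rw [hcirc]
  have hA2 : (PySem.List.pyRange 0 (n:Int) 1).foldl
      (fun d i => d.modify ((findUF (SEL.foldl unionStep (PySem.List.pyRange 0 (n:Int) 1)).length
        (SEL.foldl unionStep (PySem.List.pyRange 0 (n:Int) 1)) i).2) 0 (· + 1)) PySem.Dict.empty =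
      PySem.Dict.counter ((PySem.List.pyRange 0 (n:Int) 1).map
        (fun i => (findUF (SEL.foldl unionStep (PySem.List.pyRange 0 (n:Int) 1)).length
          (SEL.foldl unionStep (PySem.List.pyRange 0 (n:Int) 1)) i).2)) := by
    rw [PySem.Dict.counter_eq_foldl, List.foldl_map]
  rw [hA2, PySem.Dict.foldl_insert_getD_add_one_eq_counter, values_counter, values_counter]
  have hcompF' : SEL.foldl relabelStep (PySem.List.pyRange 0 (n:Int) 1) =
      (List.range n).map (fun (k : ℕ) =>
        PySem.List.pyGetD (SEL.foldl relabelStep (PySem.List.pyRange 0 (n:Int) 1)) ((k : Int)) 0) := by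
    conv_lhs => rw [list_eq_map_range_getD (SEL.foldl relabelStep (PySem.List.pyRange 0 (n:Int) 1))]
    rw [hclF]
  have hpat : ∀ a b : ℕ, a < n → b < n →
      (((findUF (SEL.foldl unionStep (PySem.List.pyRange 0 (n:Int) 1)).length
          (SEL.foldl unionStep (PySem.List.pyRange 0 (n:Int) 1)) ((a : Int))).2 =
        (findUF (SEL.foldl unionStep (PySem.List.pyRange 0 (n:Int) 1)).length
          (SEL.foldl unionStep (PySem.List.pyRange 0 (n:Int) 1)) ((b : Int))).2) ↔
       (PySem.List.pyGetD (SEL.foldl relabelStep (PySem.List.pyRange 0 (n:Int) 1)) ((a : Int)) 0 =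
        PySem.List.pyGetD (SEL.foldl relabelStep (PySem.List.pyRange 0 (n:Int) 1)) ((b : Int)) 0)) := by
    intro a b ha hb
    exact link_pattern ⟨hgF, hclF, hc1, hc2⟩
      (by omega) (by exact_mod_cast ha) (by omega) (by exact_mod_cast hb)
  have hval := counter_values_eq n _ _ hpat
  rw [pyRange_map_eq n (fun i => (findUF (SEL.foldl unionStep (PySem.List.pyRange 0 (n:Int) 1)).length
    (SEL.foldl unionStep (PySem.List.pyRange 0 (n:Int) 1)) i).2)]
  rw [hcompF']
  exact hval

theorem part_one_eq (points : List (List Int)) (cl : Int) :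
    part_one points cl = part_one_alt points cl := by
  simp only [part_one, part_one_alt, PySem.List.len_eq]
  have hedges : ∀ (m : Int),
      (PySem.List.pyRange 0 m 1).foldl (fun acc i =>
        (PySem.List.pyRange (i+1) m 1).foldl (fun acc j =>
          acc ++ [((PySem.List.pyGetD (PySem.List.pyGetD points i []) 0 0 - PySem.List.pyGetD (PySem.List.pyGetD points j []) 0 0)^2
                 + (PySem.List.pyGetD (PySem.List.pyGetD points i []) 1 0 - PySem.List.pyGetD (PySem.List.pyGetD points j []) 1 0)^2
                 + (PySem.List.pyGetD (PySem.List.pyGetD points i []) 2 0 - PySem.List.pyGetD (PySem.List.pyGetD points j []) 2 0)^2, i, j)]) acc) [] =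
      (PySem.List.pyRange 0 m 1).flatMap (fun i =>
        (PySem.List.pyRange (i+1) m 1).map (fun j =>
          ((PySem.List.pyGetD (PySem.List.pyGetD points i []) 0 0 - PySem.List.pyGetD (PySem.List.pyGetD points j []) 0 0)^2
         + (PySem.List.pyGetD (PySem.List.pyGetD points i []) 1 0 - PySem.List.pyGetD (PySem.List.pyGetD points j []) 1 0)^2
         + (PySem.List.pyGetD (PySem.List.pyGetD points i []) 2 0 - PySem.List.pyGetD (PySem.List.pyGetD points j []) 2 0)^2, i, j))) := by
    intro m
    have hinner : (fun (acc : List (Int × Int × Int)) (i : Int) =>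
        (PySem.List.pyRange (i+1) m 1).foldl (fun acc j =>
          acc ++ [((PySem.List.pyGetD (PySem.List.pyGetD points i []) 0 0 - PySem.List.pyGetD (PySem.List.pyGetD points j []) 0 0)^2
                 + (PySem.List.pyGetD (PySem.List.pyGetD points i []) 1 0 - PySem.List.pyGetD (PySem.List.pyGetD points j []) 1 0)^2
                 + (PySem.List.pyGetD (PySem.List.pyGetD points i []) 2 0 - PySem.List.pyGetD (PySem.List.pyGetD points j []) 2 0)^2, i, j)]) acc) =
        (fun acc i => acc ++ (PySem.List.pyRange (i+1) m 1).map (fun j =>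
          ((PySem.List.pyGetD (PySem.List.pyGetD points i []) 0 0 - PySem.List.pyGetD (PySem.List.pyGetD points j []) 0 0)^2
         + (PySem.List.pyGetD (PySem.List.pyGetD points i []) 1 0 - PySem.List.pyGetD (PySem.List.pyGetD points j []) 1 0)^2
         + (PySem.List.pyGetD (PySem.List.pyGetD points i []) 2 0 - PySem.List.pyGetD (PySem.List.pyGetD points j []) 2 0)^2, i, j))) := by
      funext acc i
      exact PySem.List.foldl_append_singleton_eq_map _ _ _
    rw [hinner, PySem.List.foldl_append_eq_flatMap, List.nil_append]
  rw [hedges]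
  exact tail_eq (n := points.length)
    (sel_bounds (fun i j =>
      ((PySem.List.pyGetD (PySem.List.pyGetD points i []) 0 0 - PySem.List.pyGetD (PySem.List.pyGetD points j []) 0 0)^2
     + (PySem.List.pyGetD (PySem.List.pyGetD points i []) 1 0 - PySem.List.pyGetD (PySem.List.pyGetD points j []) 1 0)^2
     + (PySem.List.pyGetD (PySem.List.pyGetD points i []) 2 0 - PySem.List.pyGetD (PySem.List.pyGetD points j []) 2 0)^2)) cl)

-- ===== VERDICT (by name: the statement is the Claim_ definition above) =====
theorem part_one_spec : Claim_equal_part_one := by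
  intro points connection_limit _ _
  exact part_one_eq points connection_limit
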